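-- pv_equiv track=rewrite | github.com/1217265165/FMFD-python | tools/export_paper_metrics.py | _choose_examples
-- ===== SOURCE A (Python) =====
-- from typing import Dict, List, Optional
--
-- def _choose_examples(labels: Dict[str, Dict[str, object]]) -> Dict[str, str]:
--     examples = {}
--     targets = {
--         "normal": "normal",
--         "amp": "amp_error",
--         "freq": "freq_error",
--         "ref": "ref_error",
--     }
--     for key, fault in targets.items():
--         for sample_id, payload in labels.items():
--             if payload.get("system_fault_class") == fault:
--                 examples[key] = sample_id
--                 break
--     return examples
-- ===== SOURCE B (Python) =====
-- # B (alternative decomposition): a single pass over labels with a reverse fault->key table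
-- # B: the result dict is assembled in A's fixed key order.
-- def _choose_examples(labels):
--     rev = {
--         "normal": "normal",
--         "amp_error": "amp",
--         "freq_error": "freq",
--         "ref_error": "ref",
--     }
--     firsts = {}
--     for sample_id, payload in labels.items():
--         key = rev.get(payload.get("system_fault_class"))
--         if key is not None and key not in firsts:
--             firsts[key] = sample_id
--     return {k: firsts[k] for k in ("normal", "amp", "freq", "ref") if k in firsts}
-- ===== Notes on version B (the rewrite author's own statement) =====
-- stated objective: alternative
-- what changed: Replaces A's four separate scans of labels (one per target fault class, each stopping at the first match) with a single pass over labels that uses a precomputed reverse fault-class-to-key table and records the first sample per class; the result is then assembled in A's fixed key order.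
import Mathlib
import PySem

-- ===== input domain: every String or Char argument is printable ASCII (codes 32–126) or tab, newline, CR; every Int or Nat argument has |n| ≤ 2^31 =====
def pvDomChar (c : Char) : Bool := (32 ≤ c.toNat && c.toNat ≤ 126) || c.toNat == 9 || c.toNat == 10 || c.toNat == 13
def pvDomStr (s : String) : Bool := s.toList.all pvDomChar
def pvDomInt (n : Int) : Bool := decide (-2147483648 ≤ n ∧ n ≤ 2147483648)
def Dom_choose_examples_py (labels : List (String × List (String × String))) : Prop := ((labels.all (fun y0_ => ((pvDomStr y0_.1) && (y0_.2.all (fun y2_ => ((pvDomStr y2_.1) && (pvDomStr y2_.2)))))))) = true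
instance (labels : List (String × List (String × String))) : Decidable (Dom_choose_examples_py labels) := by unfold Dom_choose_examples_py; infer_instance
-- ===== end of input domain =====

-- B (alternative decomposition): one pass over labels with a reverse
-- fault-class-to-key table instead of A's four per-class scans; the result is
-- assembled in A's fixed key order.

-- payload.get("system_fault_class") (payload is a Python dict)
def pvFaultOf (payload : List (String × String)) : Option String :=
  (PySem.Dict.ofList payload).get? "system_fault_class"

-- ===== PORT A =====

-- inner 'for sample_id, payload in labels.items(): … break' loop of A
def pvScanA (fault : String) : List (String × List (String × String)) → Option String
  | [] => none
  | (sid, payload) :: rest =>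
      if pvFaultOf payload = some fault then some sid else pvScanA fault rest

def choose_examples_py (labels : List (String × List (String × String))) : List (String × String) :=
  let items := (PySem.Dict.ofList labels).items
  let targets : List (String × String) :=
    [("normal", "normal"), ("amp", "amp_error"), ("freq", "freq_error"), ("ref", "ref_error")]
  (targets.foldl (fun (examples : PySem.Dict String String) kf =>
      match pvScanA kf.2 items with
      | some sid => examples.insert kf.1 sid
      | none => examples) PySem.Dict.empty).items

-- ===== PORT B =====

def pvRev : PySem.Dict String String :=
  PySem.Dict.ofList [("normal", "normal"), ("amp_error", "amp"), ("freq_error", "freq"), ("ref_error", "ref")]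

-- single pass: 'for sample_id, payload in labels.items(): …'
def pvFirsts : List (String × List (String × String)) → PySem.Dict String String → PySem.Dict String String
  | [], firsts => firsts
  | (sid, payload) :: rest, firsts =>
      match (match pvFaultOf payload with
             | some f => pvRev.get? f
             | none => none) with
      | some key => if firsts.contains key then pvFirsts rest firsts
                    else pvFirsts rest (firsts.insert key sid)
      | none => pvFirsts rest firsts

def choose_examples_py_alt (labels : List (String × List (String × String))) : List (String × String) :=
  let items := (PySem.Dict.ofList labels).items
  let firsts := pvFirsts items PySem.Dict.empty
  (["normal", "amp", "freq", "ref"].foldl (fun (ex : PySem.Dict String String) k =>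
      match firsts.get? k with
      | some sid => ex.insert k sid
      | none => ex) PySem.Dict.empty).items

-- ===== PRECONDITION & SPEC =====
def Spec_choose_examples_py (labels : List (String × List (String × String))) (out : List (String × String)) : Prop := out = choose_examples_py_alt labels
instance (labels : List (String × List (String × String))) (out : List (String × String)) : Decidable (Spec_choose_examples_py labels out) := by unfold Spec_choose_examples_py; infer_instance

-- ===== CLAIM (what is proved, stated in full; the proofs are below) =====
def Claim_equal_choose_examples_py : Prop := ∀ (labels : List (String × List (String × String))), Dom_choose_examples_py labels → Spec_choose_examples_py labels (choose_examples_py labels)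

-- ===== LEMMAS AND PROOFS =====

-- core invariant: after the single pass, the entry at key k is the old entry,
-- or else the result of A's scan for k's fault class
theorem pvFirsts_get? (k fk : String)
    (h1 : pvRev.get? fk = some k)
    (h2 : ∀ f, pvRev.get? f = some k → f = fk) :
    ∀ (items : List (String × List (String × String))) (firsts : PySem.Dict String String),
      (pvFirsts items firsts).get? k =
        (match firsts.get? k with
         | some v => some v
         | none => pvScanA fk items) := by
  intro items
  induction items with
  | nil =>
      intro firsts
      simp [pvFirsts, pvScanA]
      cases firsts.get? k <;> rfl
  | cons hd rest ih =>
      intro firsts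
      obtain ⟨sid, payload⟩ := hd
      simp only [pvFirsts, pvScanA]
      cases hfc : pvFaultOf payload with
      | none =>
          have hne : pvFaultOf payload ≠ some fk := by simp [hfc]
          simp [ih]
      | some f =>
          cases hrv : pvRev.get? f with
          | none =>
              have hne : f ≠ fk := fun e => by rw [e, h1] at hrv; cases hrv
              simp [hrv, hne, ih]
          | some key' =>
              have hcs : firsts.contains key' = (firsts.get? key').isSome := by
                rw [PySem.Dict.contains_eq_isSome_get?]
              by_cases hk : key' = k
              · subst hk
                have hf : f = fk := h2 f hrv
                subst hf
                simp only [hrv]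
                rcases hg : firsts.get? key' with _ | v
                · simp [hcs, hg, ih, PySem.Dict.get?_insert_self]
                · simp [hcs, hg, ih]
              · have hne : f ≠ fk := fun e => by
                  rw [e, h1] at hrv; exact hk (by injection hrv with h; exact h.symm)
                have hkk : k ≠ key' := fun e => hk e.symm
                simp only [hrv]
                rcases hg : firsts.get? key' with _ | v
                · simp [hcs, hg, ih, hne, PySem.Dict.get?_insert, hkk]
                · simp [hcs, hg, ih, hne]

theorem pvRev_get?_eq (f : String) : pvRev.get? f =
    (if "normal" == f then some "normal" else if "amp_error" == f then some "amp"
     else if "freq_error" == f then some "freq" else if "ref_error" == f then some "ref"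
     else none) := by
  have h : pvRev = PySem.Dict.mk
      [("normal", "normal"), ("amp_error", "amp"), ("freq_error", "freq"), ("ref_error", "ref")] := by
    decide
  rw [h]
  simp only [PySem.Dict.get?_mk_cons]
  simp [PySem.Dict.get?]

theorem pvRev_inj : ∀ f k, pvRev.get? f = some k →
    ((k = "normal" → f = "normal") ∧ (k = "amp" → f = "amp_error") ∧
     (k = "freq" → f = "freq_error") ∧ (k = "ref" → f = "ref_error")) := by
  intro f k h
  rw [pvRev_get?_eq] at h
  split_ifs at h with h1 h2 h3 h4
  all_goals first
    | exact Option.noConfusion h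
    | (injection h with h'
       subst h'
       refine ⟨fun hh => ?_, fun hh => ?_, fun hh => ?_, fun hh => ?_⟩ <;>
         first
           | exact (eq_of_beq (by assumption)).symm
           | exact absurd hh (by decide))

theorem pvFirsts_empty_get? (items : List (String × List (String × String)))
    (k fk : String) (h1 : pvRev.get? fk = some k)
    (h2 : ∀ f, pvRev.get? f = some k → f = fk) :
    (pvFirsts items PySem.Dict.empty).get? k = pvScanA fk items := by
  rw [pvFirsts_get? k fk h1 h2 items PySem.Dict.empty]
  simp [PySem.Dict.get?_empty]

-- ===== VERDICT (by name: the statement is the Claim_ definition above) =====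
theorem choose_examples_py_spec : Claim_equal_choose_examples_py := by
  intro labels _
  unfold Spec_choose_examples_py choose_examples_py choose_examples_py_alt
  have hn := pvFirsts_empty_get? (PySem.Dict.ofList labels).items "normal" "normal"
    (by decide) (fun f h => (pvRev_inj f "normal" h).1 rfl)
  have ha := pvFirsts_empty_get? (PySem.Dict.ofList labels).items "amp" "amp_error"
    (by decide) (fun f h => (pvRev_inj f "amp" h).2.1 rfl)
  have hf := pvFirsts_empty_get? (PySem.Dict.ofList labels).items "freq" "freq_error"
    (by decide) (fun f h => (pvRev_inj f "freq" h).2.2.1 rfl)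
  have hr := pvFirsts_empty_get? (PySem.Dict.ofList labels).items "ref" "ref_error"
    (by decide) (fun f h => (pvRev_inj f "ref" h).2.2.2 rfl)
  simp only [List.foldl, hn, ha, hf, hr]
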